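-- pv_equiv track=rewrite | github.com/StarlitGhost/Advent-of-Code | 2015/14/script.py | calculate
-- ===== SOURCE A (Python) =====
-- def calculate(reindeer, race_time):
--     distances = {}
--     for name, stats in reindeer.items():
--         dist_per_rest = stats['speed'] * stats['duration']
--         seconds_per_rest = stats['duration'] + stats['rest']
--         remainder = race_time % seconds_per_rest
--         cycles = race_time // seconds_per_rest
--         distances[name] = dist_per_rest * cycles
--         if remainder < stats['duration']:
--             distances[name] += stats['speed'] * remainder
--         else:
--             distances[name] += dist_per_rest
--     return distances
-- ===== SOURCE B (Python) =====
-- def calculate(reindeer, race_time):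
--     distances = {}
--     for name, stats in reindeer.items():
--         cycle = stats['duration'] + stats['rest']
--         pos = 0
--         for t in range(race_time):
--             if t % cycle < stats['duration']:
--                 pos += stats['speed']
--         distances[name] = pos
--     return distances
-- ===== Notes on version B (the rewrite author's own statement) =====
-- stated objective: alternative
-- what changed: Replaces the closed-form cycles-and-remainder arithmetic by a per-second simulation: for each reindeer, loop over range(race_time) and add speed at every second t with t % cycle < duration.
-- outside the precondition, e.g. on calculate({'R': {'speed': 2, 'duration': 3, 'rest': 2}}, -7): A returns {'R': -6}, B returns {'R': 0}; on calculate({'R': {'speed': 2, 'duration': -3, 'rest': 5}}, 10): A returns {'R': -36}, B returns {'R': 0}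
import Mathlib
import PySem

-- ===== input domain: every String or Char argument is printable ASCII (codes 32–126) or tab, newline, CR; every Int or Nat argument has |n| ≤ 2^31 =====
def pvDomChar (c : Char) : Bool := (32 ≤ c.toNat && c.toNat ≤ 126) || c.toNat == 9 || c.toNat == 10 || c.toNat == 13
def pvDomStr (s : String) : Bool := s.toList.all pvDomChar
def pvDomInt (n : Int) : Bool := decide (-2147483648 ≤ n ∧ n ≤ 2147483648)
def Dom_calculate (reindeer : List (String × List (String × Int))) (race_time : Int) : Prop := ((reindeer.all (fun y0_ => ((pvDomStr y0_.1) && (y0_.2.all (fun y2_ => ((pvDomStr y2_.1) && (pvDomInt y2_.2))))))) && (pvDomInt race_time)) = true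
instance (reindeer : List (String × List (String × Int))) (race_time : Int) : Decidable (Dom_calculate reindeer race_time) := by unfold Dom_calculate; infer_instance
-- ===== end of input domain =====

-- B replaces A's closed-form cycles/remainder arithmetic by a per-second simulation over
-- range(race_time) (an alternative algorithm; asymptotically slower, not faster).


-- ===== PORT A =====
-- stats['k'] is ported as getD … 0; Pre_calculate guarantees the key is present, so the
-- default is never used inside Pre_ (outside Pre_ Python raises KeyError).
def calculate (reindeer : List (String × List (String × Int))) (race_time : Int) : List (String × Int) :=
  (reindeer.foldl (fun (distances : PySem.Dict String Int) p =>
    let name := p.1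
    let stats : PySem.Dict String Int := PySem.Dict.mk p.2
    let dist_per_rest := stats.getD "speed" 0 * stats.getD "duration" 0
    let seconds_per_rest := stats.getD "duration" 0 + stats.getD "rest" 0
    let remainder := PySem.Int.mod race_time seconds_per_rest
    let cycles := PySem.Int.floordiv race_time seconds_per_rest
    let d1 := distances.insert name (dist_per_rest * cycles)
    if remainder < stats.getD "duration" 0 then
      d1.insert name (d1.getD name 0 + stats.getD "speed" 0 * remainder)
    else
      d1.insert name (d1.getD name 0 + dist_per_rest)) PySem.Dict.empty).items

-- ===== PORT B =====
-- per-second simulation: for t in range(race_time): if t % cycle < duration: pos += speed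
def calculate_alt (reindeer : List (String × List (String × Int))) (race_time : Int) : List (String × Int) :=
  (reindeer.foldl (fun (distances : PySem.Dict String Int) p =>
    let stats : PySem.Dict String Int := PySem.Dict.mk p.2
    let cycle := stats.getD "duration" 0 + stats.getD "rest" 0
    let pos := (PySem.List.pyRange 0 race_time 1).foldl
      (fun pos t => if PySem.Int.mod t cycle < stats.getD "duration" 0 then pos + stats.getD "speed" 0 else pos) 0
    distances.insert p.1 pos) PySem.Dict.empty).items

-- ===== PRECONDITION & SPEC =====
-- Pre_ excludes the inputs where Python A raises — a stats dict missing one of the keys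
-- 'speed'/'duration'/'rest' (KeyError) or with duration + rest = 0 (ZeroDivisionError) —
-- and, beyond those, restricts to the task's natural domain: nonnegative race_time,
-- duration and rest. On negative times/stats A still returns a value, but that value is an
-- accidental floor-division extrapolation (e.g. a negative distance for a negative
-- race_time), while B's simulation naturally covers no seconds there.
def Pre_calculate (reindeer : List (String × List (String × Int))) (race_time : Int) : Prop :=
  0 ≤ race_time ∧
  ∀ p ∈ reindeer,
    (PySem.Dict.mk p.2).contains "speed" = true ∧
    (PySem.Dict.mk p.2).contains "duration" = true ∧
    (PySem.Dict.mk p.2).contains "rest" = true ∧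
    0 ≤ (PySem.Dict.mk p.2).getD "duration" 0 ∧
    0 ≤ (PySem.Dict.mk p.2).getD "rest" 0 ∧
    (PySem.Dict.mk p.2).getD "duration" 0 + (PySem.Dict.mk p.2).getD "rest" 0 ≠ 0
instance (reindeer : List (String × List (String × Int))) (race_time : Int) : Decidable (Pre_calculate reindeer race_time) := by unfold Pre_calculate; infer_instance

def pvWitness_calculate : (List (String × List (String × Int))) × Int :=
  ([("Comet", [("speed", 14), ("duration", 10), ("rest", 127)]),
    ("Dancer", [("speed", 16), ("duration", 11), ("rest", 162)])], 1000)

def Spec_calculate (reindeer : List (String × List (String × Int))) (race_time : Int) (out : List (String × Int)) : Prop := out = calculate_alt reindeer race_time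
instance (reindeer : List (String × List (String × Int))) (race_time : Int) (out : List (String × Int)) : Decidable (Spec_calculate reindeer race_time out) := by unfold Spec_calculate; infer_instance

-- ===== CLAIM (what is proved, stated in full; the proofs are below) =====
def Claim_equal_calculate : Prop := ∀ (reindeer : List (String × List (String × Int))) (race_time : Int), Dom_calculate reindeer race_time → Pre_calculate reindeer race_time → Spec_calculate reindeer race_time (calculate reindeer race_time)

-- ===== LEMMAS AND PROOFS =====

-- Pure arithmetic: one more second changes the closed form by exactly the moving indicator.
theorem pv_delta (a s d c q r q2 r2 : Int) (hd : 0 ≤ d) (hdc : d ≤ c) (hr0 : 0 ≤ r) (hrc : r < c)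
    (h12 : (r + 1 < c ∧ q2 = q ∧ r2 = r + 1) ∨ (r + 1 = c ∧ q2 = q + 1 ∧ r2 = 0)) :
    (if r < d then (a + (s * d * q + (if r < d then s * r else s * d))) + s
     else (a + (s * d * q + (if r < d then s * r else s * d))))
    = a + (s * d * q2 + (if r2 < d then s * r2 else s * d)) := by
  rcases h12 with ⟨hlt, hq2, hr2⟩ | ⟨heq, hq2, hr2⟩ <;> subst hq2 <;> subst hr2 <;>
    split_ifs with hA hB hB
  · ring
  · have h1 : d = r + 1 := by omega
    subst h1; ring
  · omega
  · ring
  · have h1 : d = c := by omega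
    have h2 : r = c - 1 := by omega
    subst h1; subst h2; ring
  · omega
  · ring
  · have h1 : d = 0 := by omega
    subst h1; ring

-- The per-second simulation over [0, t) equals A's closed form (0 ≤ d ≤ c, 0 < c, 0 ≤ t).
theorem pv_sim_eq_closed (s d c : Int) (hd : 0 ≤ d) (hdc : d ≤ c) (hc : 0 < c) :
    ∀ (t : Int), 0 ≤ t → ∀ (a : Int),
    (PySem.List.pyRange 0 t 1).foldl
      (fun pos u => if PySem.Int.mod u c < d then pos + s else pos) a
    = a + (s * d * PySem.Int.floordiv t c +
        (if PySem.Int.mod t c < d then s * PySem.Int.mod t c else s * d)) := by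
  intro t ht
  induction t, ht using Int.le_induction with
  | base =>
    intro a
    rw [PySem.List.pyRange_one_eq_nil (by omega)]
    simp only [List.foldl_nil, PySem.Int.floordiv_eq_ediv_of_pos hc, PySem.Int.mod_eq_emod_of_pos hc,
      Int.zero_ediv, Int.zero_emod]
    rcases lt_or_eq_of_le hd with h | h
    · simp [h]
    · simp [← h]
  | succ t ht ih =>
    intro a
    rw [PySem.List.pyRange_one_succ_right (by omega), List.foldl_append, ih]
    simp only [List.foldl_cons, List.foldl_nil,
      PySem.Int.floordiv_eq_ediv_of_pos hc, PySem.Int.mod_eq_emod_of_pos hc]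
    have hq : c * (t / c) + t % c = t := Int.mul_ediv_add_emod t c
    have hr0 : 0 ≤ t % c := Int.emod_nonneg t (by omega)
    have hrc : t % c < c := Int.emod_lt_of_pos t hc
    by_cases hcase : t % c + 1 < c
    · have h1 : (t + 1) % c = t % c + 1 := by
        have he : t + 1 = (t % c + 1) + c * (t / c) := by omega
        rw [he, Int.add_mul_emod_self_left, Int.emod_eq_of_lt (by omega) hcase]
      have h2 : (t + 1) / c = t / c := by
        have he : t + 1 = (t % c + 1) + c * (t / c) := by omega
        rw [he, Int.add_mul_ediv_left _ _ (by omega : c ≠ 0),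
          Int.ediv_eq_zero_of_lt (by omega) hcase, zero_add]
      exact pv_delta a s d c (t / c) (t % c) _ _ hd hdc hr0 hrc (Or.inl ⟨hcase, h2, h1⟩)
    · have hc1 : t % c + 1 = c := by omega
      have he : t + 1 = c * (t / c + 1) := by rw [mul_add, mul_one]; omega
      have h1 : (t + 1) % c = 0 := by rw [he, Int.mul_emod_right]
      have h2 : (t + 1) / c = t / c + 1 := by
        rw [he, Int.mul_ediv_cancel_left _ (by omega : c ≠ 0)]
      exact pv_delta a s d c (t / c) (t % c) _ _ hd hdc hr0 hrc (Or.inr ⟨hc1, h2, h1⟩)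

-- One step of A's loop equals one step of B's loop, given the per-reindeer Pre_ facts.
theorem pv_step_eq (dct : PySem.Dict String Int) (p : String × List (String × Int)) (race_time : Int)
    (ht : 0 ≤ race_time)
    (hd : 0 ≤ (PySem.Dict.mk p.2).getD "duration" 0)
    (hr : 0 ≤ (PySem.Dict.mk p.2).getD "rest" 0)
    (hc : (PySem.Dict.mk p.2).getD "duration" 0 + (PySem.Dict.mk p.2).getD "rest" 0 ≠ 0) :
    (let name := p.1
     let stats : PySem.Dict String Int := PySem.Dict.mk p.2
     let dist_per_rest := stats.getD "speed" 0 * stats.getD "duration" 0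
     let seconds_per_rest := stats.getD "duration" 0 + stats.getD "rest" 0
     let remainder := PySem.Int.mod race_time seconds_per_rest
     let cycles := PySem.Int.floordiv race_time seconds_per_rest
     let d1 := dct.insert name (dist_per_rest * cycles)
     if remainder < stats.getD "duration" 0 then
       d1.insert name (d1.getD name 0 + stats.getD "speed" 0 * remainder)
     else
       d1.insert name (d1.getD name 0 + dist_per_rest)) =
    (let stats : PySem.Dict String Int := PySem.Dict.mk p.2
     let cycle := stats.getD "duration" 0 + stats.getD "rest" 0
     let pos := (PySem.List.pyRange 0 race_time 1).foldl
       (fun pos t => if PySem.Int.mod t cycle < stats.getD "duration" 0 then pos + stats.getD "speed" 0 else pos) 0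
     dct.insert p.1 pos) := by
  simp only [PySem.Dict.getD_insert_self, PySem.Dict.insert_insert_self]
  set stats : PySem.Dict String Int := PySem.Dict.mk p.2
  set s := stats.getD "speed" 0
  set d := stats.getD "duration" 0
  set r := stats.getD "rest" 0
  rw [pv_sim_eq_closed s d (d + r) hd (by omega) (by omega) race_time ht 0]
  by_cases h : PySem.Int.mod race_time (d + r) < d
  · rw [if_pos h, if_pos h]; ring_nf
  · rw [if_neg h, if_neg h]; ring_nf

-- ===== VERDICT (by name: the statement is the Claim_ definition above) =====
theorem calculate_spec : Claim_equal_calculate := by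
  intro reindeer race_time _ hpre
  unfold Spec_calculate calculate calculate_alt
  rcases hpre with ⟨ht, hall⟩
  congr 1
  refine PySem.List.foldl_congr_mem' _ _ _ _ ?_
  intro p hp acc
  rcases hall p hp with ⟨_, _, _, hd, hr, hc⟩
  exact pv_step_eq acc p race_time ht hd hr hc
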